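-- pv_equiv track=rewrite | github.com/mikekono/crypto-challenges | set1.py | detect_ebc_or_cbc
-- ===== SOURCE A (Python) =====
-- def detect_ebc_or_cbc(ciphertext):
-- 	split_text = [ciphertext[i:i+2] for i in range(0, len(ciphertext), 2)] # split the text into 16 byte sequences
-- 	d = dict()
-- 	for i in range(0, len(split_text)):
-- 		if split_text[i] in d:
-- 			d[split_text[i]] += 1
-- 		else:
-- 			d[split_text[i]] = 1
--
-- 	dup_count = 0
-- 	for keys in d:
-- 		if d[keys] > 1:
-- 			dup_count+=1
-- 	return dup_count
-- ===== SOURCE B (Python) =====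
-- def detect_ebc_or_cbc(ciphertext):
--     chunks = sorted(ciphertext[i:i+2] for i in range(0, len(ciphertext), 2))
--     return len({x for x, y in zip(chunks, chunks[1:]) if x == y})
-- ===== Notes on version B (the rewrite author's own statement) =====
-- stated objective: alternative
-- what changed: Replaced A's hash-counting (build a frequency dict, then a second loop filtering keys with count > 1) by a sort-then-scan algorithm: sort the 2-char chunks, then the distinct chunks occurring more than once are exactly the values of adjacent equal pairs in the sorted list, collected as a set.
import Mathlib
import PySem

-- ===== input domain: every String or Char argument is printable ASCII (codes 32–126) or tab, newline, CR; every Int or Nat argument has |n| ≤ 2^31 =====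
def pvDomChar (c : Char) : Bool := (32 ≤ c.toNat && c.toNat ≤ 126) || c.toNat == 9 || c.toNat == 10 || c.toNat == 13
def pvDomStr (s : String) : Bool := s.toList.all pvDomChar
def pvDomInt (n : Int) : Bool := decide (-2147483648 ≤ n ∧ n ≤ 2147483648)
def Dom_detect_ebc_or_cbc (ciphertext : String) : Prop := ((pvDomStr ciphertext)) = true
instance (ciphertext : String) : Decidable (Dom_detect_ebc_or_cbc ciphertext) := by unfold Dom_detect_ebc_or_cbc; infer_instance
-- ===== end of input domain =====

-- B replaces A's frequency-dict build plus key-filtering loop by a sort-then-scan: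
-- sort the chunks and collect the values of adjacent equal pairs (objective: alternative).

-- ===== PORT A =====
def detect_ebc_or_cbc (ciphertext : String) : Int :=
  let split_text : List String :=
    (PySem.List.pyRange 0 (PySem.Str.len ciphertext) 2).map
      (fun i => PySem.Str.slice ciphertext (some i) (some (i + 2)))
  let d : PySem.Dict String Int :=
    (PySem.List.pyRange 0 (PySem.List.len split_text) 1).foldl
      (fun d i =>
        let c := PySem.List.pyGetD split_text i ""
        if d.contains c then d.insert c (d.getD c 0 + 1) else d.insert c 1)
      PySem.Dict.empty
  d.keys.foldl (fun dup_count k => if d.getD k 0 > 1 then dup_count + 1 else dup_count) 0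

-- ===== PORT B =====
def detect_ebc_or_cbc_alt (ciphertext : String) : Int :=
  let chunks : List String :=
    PySem.List.sorted
      ((PySem.List.pyRange 0 (PySem.Str.len ciphertext) 2).map
        (fun i => PySem.Str.slice ciphertext (some i) (some (i + 2))))
      (fun x => x) false
  (PySem.Set.len (PySem.Set.ofList
    (((chunks.zip (PySem.List.slice chunks (some 1) none)).filter
        (fun p => p.1 == p.2)).map Prod.fst)) : Int)

-- ===== PRECONDITION & SPEC =====
def Spec_detect_ebc_or_cbc (ciphertext : String) (out : Int) : Prop := out = detect_ebc_or_cbc_alt ciphertext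
instance (ciphertext : String) (out : Int) : Decidable (Spec_detect_ebc_or_cbc ciphertext out) := by unfold Spec_detect_ebc_or_cbc; infer_instance

-- ===== CLAIM =====
def Claim_equal_detect_ebc_or_cbc : Prop := ∀ (ciphertext : String), Dom_detect_ebc_or_cbc ciphertext → Spec_detect_ebc_or_cbc ciphertext (detect_ebc_or_cbc ciphertext)

-- ===== LEMMAS AND PROOFS =====

-- In a (≤)-sorted list, the first components of adjacent equal pairs are exactly
-- the values occurring at least twice.
theorem pv_adj (s : List String) (hs : s.Pairwise (· ≤ ·)) (c : String) :
    (c ∈ ((s.zip s.tail).filter (fun p => p.1 == p.2)).map Prod.fst) ↔ 2 ≤ s.count c := by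
  induction s with
  | nil => simp
  | cons a t ih =>
    cases t with
    | nil =>
      simp only [List.tail_cons, List.zip_nil_right, List.filter_nil, List.map_nil,
        List.not_mem_nil, false_iff, not_le, List.count_cons, List.count_nil]
      split <;> omega
    | cons b t' =>
      have hab : a ≤ b := (List.pairwise_cons.mp hs).1 b (by simp)
      have hbt : (b :: t').Pairwise (· ≤ ·) := (List.pairwise_cons.mp hs).2
      have ihbt := ih hbt
      simp only [List.tail_cons] at ihbt
      simp only [List.tail_cons, List.zip_cons_cons, List.filter_cons]
      by_cases hc : c = a
      · subst hc
        by_cases hcb : c = b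
        · subst hcb
          simp only [beq_self_eq_true, if_pos, List.map_cons, List.mem_cons, true_or, true_iff]
          simp
        · have hne : (c == b) = false := by simp [hcb]
          rw [hne]
          simp only [Bool.false_eq_true, if_neg, not_false_iff]
          rw [ihbt]
          have hnotmem : c ∉ b :: t' := by
            intro h
            rcases List.mem_cons.mp h with h | h
            · exact hcb h
            · exact hcb (le_antisymm hab ((List.pairwise_cons.mp hbt).1 c h))
          have hc0 : (b :: t').count c = 0 := List.count_eq_zero.mpr hnotmem
          rw [List.count_cons_self, hc0]
          omega
      · have hcount : (a :: b :: t').count c = (b :: t').count c := by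
          have hac : ¬ a = c := fun h => hc h.symm
          simp [List.count_cons, hac]
        rw [hcount, ← ihbt]
        by_cases hab' : (a == b) = true
        · rw [if_pos hab']
          simp only [List.map_cons, List.mem_cons]
          constructor
          · rintro (h | h)
            · exact absurd h hc
            · exact h
          · exact fun h => Or.inr h
        · rw [if_neg hab']

-- A's value on the chunk list l is the number of distinct elements of l with count > 1.
theorem pv_a_eq (l : List String) :
    (let d : PySem.Dict String Int :=
      (PySem.List.pyRange 0 (PySem.List.len l) 1).foldl
        (fun d i =>
          let c := PySem.List.pyGetD l i ""
          if d.contains c then d.insert c (d.getD c 0 + 1) else d.insert c 1)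
        PySem.Dict.empty
    d.keys.foldl (fun dup_count k => if d.getD k 0 > 1 then dup_count + 1 else dup_count) 0)
    = ((PySem.Set.ofList l).countP (fun k => decide (2 ≤ l.count k)) : Int) := by
  simp only []
  have hd : List.foldl
      (fun (d : PySem.Dict String Int) i =>
        if d.contains (PySem.List.pyGetD l i "") then
          d.insert (PySem.List.pyGetD l i "") (d.getD (PySem.List.pyGetD l i "") 0 + 1)
        else d.insert (PySem.List.pyGetD l i "") 1)
      PySem.Dict.empty (PySem.List.pyRange 0 (PySem.List.len l))
      = List.foldl
      (fun (d : PySem.Dict String Int) c =>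
        if d.contains c then d.insert c (d.getD c 0 + 1) else d.insert c 1)
      PySem.Dict.empty l := by
    have h := PySem.List.foldl_pyRange_zero_pyGetD l ""
      (fun (d : PySem.Dict String Int) c =>
        if d.contains c then d.insert c (d.getD c 0 + 1) else d.insert c 1)
      PySem.Dict.empty
    simp only at h
    exact h
  rw [hd]
  have hstep : l.foldl
      (fun (d : PySem.Dict String Int) c =>
        if d.contains c then d.insert c (d.getD c 0 + 1) else d.insert c 1)
      PySem.Dict.empty = PySem.Dict.counter l := by
    rw [← PySem.Dict.foldl_insert_getD_add_one_eq_counter]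
    apply PySem.List.foldl_congr_mem
    intro d c _
    by_cases h : d.contains c
    · rw [if_pos h]
    · rw [if_neg h]
      have h0 : d.getD c 0 = 0 := PySem.Dict.getD_of_not_contains d 0 (by simpa using h)
      rw [h0]
      norm_num
  rw [hstep, PySem.Dict.keys_counter]
  rw [PySem.List.foldl_ite_add_one]
  have : (PySem.Set.ofList l).countP (fun k => decide ((PySem.Dict.counter l).getD k 0 > 1))
       = (PySem.Set.ofList l).countP (fun k => decide (2 ≤ l.count k)) := by
    apply List.countP_congr
    intro k _
    simp only [PySem.Dict.getD_counter, decide_eq_true_eq]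
    omega
  rw [this]
  ring

-- the two counts agree: countP over set(l) vs the set of adjacent-equal values of sorted(l)
theorem pv_counts (l : List String) :
    ((PySem.Set.ofList l).countP (fun k => decide (2 ≤ l.count k)) : Int)
    = (PySem.Set.len (PySem.Set.ofList
        ((((PySem.List.sorted l (fun x => x) false).zip
            (PySem.List.sorted l (fun x => x) false).tail).filter
              (fun p => p.1 == p.2)).map Prod.fst)) : Int) := by
  set s := PySem.List.sorted l (fun x => x) false with hsdef
  have hs : s.Pairwise (· ≤ ·) := PySem.List.sorted_pairwise l (fun x => x)
  have hperm : s.Perm l := PySem.List.sorted_perm l (fun x => x) false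
  have hcnt : ∀ c, s.count c = l.count c := fun c => hperm.count_eq c
  rw [List.countP_eq_length_filter]
  have hp : ((PySem.Set.ofList l).filter (fun k => decide (2 ≤ l.count k))).Perm
      (PySem.Set.ofList (((s.zip s.tail).filter (fun p => p.1 == p.2)).map Prod.fst)) := by
    rw [List.perm_ext_iff_of_nodup
      (List.Nodup.filter _ (PySem.Set.nodup_ofList l)) (PySem.Set.nodup_ofList _)]
    intro c
    rw [List.mem_filter, PySem.Set.mem_ofList, PySem.Set.mem_ofList,
        pv_adj s hs c, hcnt, decide_eq_true_eq]
    constructor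
    · exact fun h => h.2
    · intro h
      exact ⟨List.one_le_count_iff.mp (by omega), h⟩
  rw [hp.length_eq]
  rfl

-- ===== VERDICT =====
theorem detect_ebc_or_cbc_spec : Claim_equal_detect_ebc_or_cbc := by
  intro ciphertext _
  unfold Spec_detect_ebc_or_cbc detect_ebc_or_cbc detect_ebc_or_cbc_alt
  simp only [PySem.List.slice_from_one]
  rw [pv_a_eq, pv_counts]
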